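-- pv_equiv track=rewrite | github.com/i-X-ce/poke-simulation | src/python/binary_input_search/genetic_algorithm.py | get_total_steps
-- ===== SOURCE A (Python) =====
-- from collections import deque
--
-- def get_total_steps(operations, target_byte):
--     """
--     操作回数を計算する
--
--     :param operations: [v1, v2, ...] の操作量リスト
--     :param target_byte: 作りたいバイト列
--     """
--     costs = [-1] * 256
--     costs[0] = 0
--     queue = deque([0])
--
--     while queue:
--         curr = queue.popleft()
--         if all(costs[t] != -1 for t in target_byte):
--             pass
--
--         curr_step = costs[curr]
--         for op in operations:
--             nxt = (curr + op) % 256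
--             if costs[nxt] == -1:
--                 costs[nxt] = curr_step + 1
--                 queue.append(nxt)
--
--     if any(costs[t] == -1 for t in target_byte):
--         return 99999
--
--     return sum(costs[t] for t in target_byte)
-- ===== SOURCE B (Python) =====
-- def get_total_steps(operations, target_byte):
--     """
--     操作回数を計算する
--
--     :param operations: [v1, v2, ...] の操作量リスト
--     :param target_byte: 作りたいバイト列
--     """
--     # Bellman-Ford-style distance computation: no queue, just 256 synchronous
--     # relaxation rounds over the whole residue array, reading the old array.
--     costs = [-1] * 256
--     costs[0] = 0
--     for _ in range(256):
--         new = costs[:]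
--         for r in range(256):
--             base = costs[r]
--             if base == -1:
--                 continue
--             for op in operations:
--                 n = (r + op) % 256
--                 if new[n] == -1:
--                     new[n] = base + 1
--         costs = new
--
--     if any(costs[t] == -1 for t in target_byte):
--         return 99999
--
--     return sum(costs[t] for t in target_byte)
-- ===== Notes on version B (the rewrite author's own statement) =====
-- stated objective: alternative
-- what changed: Replaces the deque-based BFS (and its dead all(...) check) by a queue-free Bellman-Ford-style fixpoint: 256 synchronous relaxation rounds that each scan all 256 residues and relax every reached residue's neighbours in a fresh copy of the array, then the same 99999/sum final logic.
-- outside the precondition, e.g. on get_total_steps([2], [1, 999]): A returns 99999, B returns 99999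
import Mathlib
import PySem

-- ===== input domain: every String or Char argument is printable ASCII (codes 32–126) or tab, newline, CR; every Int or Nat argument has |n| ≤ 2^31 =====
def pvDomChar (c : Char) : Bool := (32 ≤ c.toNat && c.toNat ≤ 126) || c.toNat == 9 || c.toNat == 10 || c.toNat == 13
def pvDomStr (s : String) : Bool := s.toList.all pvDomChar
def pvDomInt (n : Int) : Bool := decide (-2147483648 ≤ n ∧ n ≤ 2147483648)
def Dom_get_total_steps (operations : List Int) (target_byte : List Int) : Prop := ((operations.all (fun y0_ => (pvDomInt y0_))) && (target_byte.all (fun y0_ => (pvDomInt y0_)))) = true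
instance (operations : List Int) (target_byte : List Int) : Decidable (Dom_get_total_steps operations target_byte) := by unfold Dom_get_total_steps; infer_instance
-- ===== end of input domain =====

-- B replaces A's deque-based BFS (and its dead `all(...)` check) by a queue-free
-- Bellman-Ford-style fixpoint: 256 synchronous relaxation rounds, each scanning all
-- 256 residues and relaxing every reached residue's neighbours in a fresh array copy.

-- ===== PORT A =====
-- inner relaxation step of A's BFS: if costs[nxt] == -1, set it and enqueue nxt
-- ((r + op) % 256 is in [0, 256), so plain .toNat indexing of the 256-entry list is exact)
def pvIn (s r : Int) (st : List Int × List Int) (op : Int) : List Int × List Int :=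
  let nxt := PySem.Int.mod (r + op) 256
  if st.1.getD nxt.toNat (-1) == -1 then (st.1.set nxt.toNat (s + 1), st.2 ++ [nxt]) else st

-- while queue: pop left, relax every operation, append newly reached residues.
-- fuel: every element is enqueued at most once (only when its cost turns from -1),
-- so at most 256 iterations ever run; fuel 257 never runs out (proved via pvMain below).
def pvRunA (ops : List Int) : Nat → List Int → List Int → List Int
  | 0, _, c => c
  | _ + 1, [], c => c
  | f + 1, r :: q, c =>
    -- A's `if all(costs[t] != -1 for t in target_byte): pass` is a no-op here;
    -- the IndexError it can raise is excluded by Pre_get_total_steps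
    let s := c.getD r.toNat (-1)
    let p := List.foldl (pvIn s r) (c, []) ops
    pvRunA ops f (q ++ p.2) p.1

def get_total_steps (operations : List Int) (target_byte : List Int) : Int :=
  let costs := pvRunA operations 257 [0] ((List.replicate 256 (-1 : Int)).set 0 0)
  if target_byte.any (fun t => PySem.List.pyGetD costs t (-1) == -1) then 99999
  else target_byte.foldl (fun acc t => acc + PySem.List.pyGetD costs t (-1)) 0

-- ===== PORT B =====
-- inner relaxation of B: if new[n] == -1, set new[n] = base + 1 (base read from the OLD array)
def pvRelax (base r : Int) (new : List Int) (op : Int) : List Int :=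
  let n := PySem.Int.mod (r + op) 256
  if new.getD n.toNat (-1) == -1 then new.set n.toNat (base + 1) else new

-- one synchronous round: `new = costs[:]; for r in range(256): ... ; costs = new`
def pvSweep (ops : List Int) (costs : List Int) : List Int :=
  List.foldl (fun new r =>
    let base := costs.getD r.toNat (-1)
    if base == -1 then new else List.foldl (pvRelax base r) new ops)
    costs (PySem.List.pyRange 0 256 1)

-- `for _ in range(256): costs = sweep(costs)`
def pvRunJ (ops : List Int) : Nat → List Int → List Int
  | 0, c => c
  | f + 1, c => pvRunJ ops f (pvSweep ops c)

def get_total_steps_alt (operations : List Int) (target_byte : List Int) : Int :=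
  let costs := pvRunJ operations 256 ((List.replicate 256 (-1 : Int)).set 0 0)
  if target_byte.any (fun t => PySem.List.pyGetD costs t (-1) == -1) then 99999
  else target_byte.foldl (fun acc t => acc + PySem.List.pyGetD costs t (-1)) 0

-- ===== PRECONDITION & SPEC =====
-- Pre_ excludes target lists with an entry outside [-256, 255]: costs[t] raises IndexError
-- there (in the dead all()-check, the any()-check or the final sum) — except that, because
-- any()/all() short-circuit, both programs can still return 99999 when an earlier unreachable
-- target stops evaluation before the out-of-range index is touched (both agree there).
def Pre_get_total_steps (operations : List Int) (target_byte : List Int) : Prop :=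
  ∀ t ∈ target_byte, -256 ≤ t ∧ t < 256
instance (operations : List Int) (target_byte : List Int) : Decidable (Pre_get_total_steps operations target_byte) := by unfold Pre_get_total_steps; infer_instance

def pvWitness_get_total_steps : List Int × List Int := ([3, 5], [7, 200])

def Spec_get_total_steps (operations : List Int) (target_byte : List Int) (out : Int) : Prop := out = get_total_steps_alt operations target_byte
instance (operations : List Int) (target_byte : List Int) (out : Int) : Decidable (Spec_get_total_steps operations target_byte out) := by unfold Spec_get_total_steps; infer_instance

-- ===== CLAIM (what is proved, stated in full; the proofs are below) =====
def Claim_equal_get_total_steps : Prop := ∀ (operations : List Int) (target_byte : List Int), Dom_get_total_steps operations target_byte → Pre_get_total_steps operations target_byte → Spec_get_total_steps operations target_byte (get_total_steps operations target_byte)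

-- ===== LEMMAS AND PROOFS =====

-- level-synchronous reformulation of A's BFS, used as a stepping stone between the two ports
def pvRound (ops : List Int) (st : List Int × List Int) (fr : List Int) : List Int × List Int :=
  List.foldl (fun (st : List Int × List Int) r' =>
    List.foldl (pvIn (st.1.getD r'.toNat (-1)) r') st ops) st fr

def pvRunBO (ops : List Int) : Nat → List Int → List Int → List Int
  | 0, _, c => c
  | _ + 1, [], c => c
  | f + 1, r :: rest, c =>
    let p := pvRound ops (c, []) (r :: rest)
    pvRunBO ops f p.2 p.1

def pvInv (c : List Int) : Prop := c.length = 256 ∧ ∀ x ∈ c, -1 ≤ x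

-- the target index of one relaxation, and the generic conditional-set operations
def pvJ (r op : Int) : Nat := (PySem.Int.mod (r + op) 256).toNat

def pvTouch (v : Int) (c : List Int) (n : Nat) : List Int :=
  if c.getD n (-1) == -1 then c.set n v else c

def pvTouchP (c : List Int) (p : Nat × Int) : List Int :=
  if c.getD p.1 (-1) == -1 then c.set p.1 p.2 else c

def pvSweepPairs (ops : List Int) (c : List Int) : List (Nat × Int) :=
  (PySem.List.pyRange 0 256 1).flatMap (fun r =>
    if c.getD r.toNat (-1) = -1 then [] else ops.map (fun op => (pvJ r op, c.getD r.toNat (-1) + 1)))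

-- full invariant of one BFS level: array shape, frontier at value k, closure off the frontier
def pvInvFull (ops : List Int) (k : Int) (c fr : List Int) : Prop :=
  pvInv c ∧ 0 ≤ k ∧ (∀ r ∈ fr, 0 ≤ r ∧ r < 256 ∧ c.getD r.toNat (-1) = k) ∧
    (∀ i : Nat, i < 256 → c.getD i (-1) ≠ -1 → (i : Int) ∉ fr →
      ∀ op ∈ ops, c.getD (pvJ (i : Int) op) (-1) ≠ -1)

def pvClosed (ops : List Int) (c : List Int) : Prop :=
  ∀ i : Nat, i < 256 → c.getD i (-1) ≠ -1 → ∀ op ∈ ops, c.getD (pvJ (i : Int) op) (-1) ≠ -1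

lemma pvNxt_lt (r op : Int) : (PySem.Int.mod (r + op) 256).toNat < 256 := by
  have h1 := PySem.Int.mod_nonneg (r + op) (b := 256) (by norm_num)
  have h2 := PySem.Int.mod_lt (r + op) (b := 256) (by norm_num)
  omega

lemma pvJ_lt (r op : Int) : pvJ r op < 256 := pvNxt_lt r op

lemma pvCount_set {c : List Int} {i : Nat} (hi : i < c.length) (h : c.getD i (-1) = -1)
    {v : Int} (hv : v ≠ -1) : (c.set i v).count (-1) + 1 = c.count (-1) := by
  induction c generalizing i with
  | nil => simp at hi
  | cons x t ih =>
    cases i with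
    | zero =>
      simp [List.getD] at h
      subst h
      simp [hv]
    | succ n =>
      simp at hi
      have := ih (i := n) hi (by simpa [List.getD] using h)
      simp [List.count_cons]
      omega

lemma pvGetD_ge (c : List Int) (hc : pvInv c) (k : Nat) : -1 ≤ c.getD k (-1) := by
  by_cases hk : k < c.length
  · rw [List.getD_eq_getElem _ _ hk]
    exact hc.2 _ (List.getElem_mem hk)
  · rw [List.getD_eq_default _ _ (by omega)]

lemma pvIn_inv {s r : Int} {st : List Int × List Int} (hs : -1 ≤ s) (h : pvInv st.1) (op : Int) :
    pvInv (pvIn s r st op).1 := by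
  simp only [pvIn]
  split
  · refine ⟨by simpa using h.1, ?_⟩
    intro x hx
    rcases List.mem_or_eq_of_mem_set hx with hx' | rfl
    · exact h.2 x hx'
    · omega
  · exact h

lemma pvIn_count {s r : Int} {st : List Int × List Int} (hs : -1 ≤ s) (h : pvInv st.1) (op : Int) :
    (pvIn s r st op).1.count (-1) + (pvIn s r st op).2.length
      = st.1.count (-1) + st.2.length := by
  simp only [pvIn]
  split
  case isTrue heq =>
    have hlt : (PySem.Int.mod (r + op) 256).toNat < st.1.length := by
      rw [h.1]; exact pvNxt_lt r op
    have := pvCount_set hlt (by simpa using heq) (v := s + 1) (by omega)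
    simp only []
    simp [this.symm]
    omega
  · rfl

lemma pvGetD_set_ne {c : List Int} {i k : Nat} {v d : Int} (h : i ≠ k) :
    (c.set i v).getD k d = c.getD k d := by
  simp [List.getD_eq_getElem?_getD, h]

lemma pvGetD_set_self {c : List Int} {i : Nat} {v d : Int} (h : i < c.length) :
    (c.set i v).getD i d = v := by
  simp [List.getD_eq_getElem?_getD, h]

lemma pvIn_mono {s r : Int} {st : List Int × List Int} (hs : -1 ≤ s) (op : Int) (k : Nat)
    (h : st.1.getD k (-1) ≠ -1) : (pvIn s r st op).1.getD k (-1) ≠ -1 := by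
  simp only [pvIn]
  split
  · by_cases hk : (PySem.Int.mod (r + op) 256).toNat = k
    · subst hk
      by_cases hlt : (PySem.Int.mod (r + op) 256).toNat < st.1.length
      · rw [pvGetD_set_self hlt]; omega
      · rw [List.set_eq_of_length_le (by omega)]; exact h
    · rw [pvGetD_set_ne hk]; exact h
  · exact h

lemma pvFold_inv {s r : Int} (hs : -1 ≤ s) (l : List Int) (st : List Int × List Int)
    (h : pvInv st.1) : pvInv (List.foldl (pvIn s r) st l).1 := by
  induction l generalizing st with
  | nil => exact h
  | cons x t ih => exact ih _ (pvIn_inv hs h x)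

lemma pvFold_count {s r : Int} (hs : -1 ≤ s) (l : List Int) (st : List Int × List Int)
    (h : pvInv st.1) :
    (List.foldl (pvIn s r) st l).1.count (-1) + (List.foldl (pvIn s r) st l).2.length
      = st.1.count (-1) + st.2.length := by
  induction l generalizing st with
  | nil => rfl
  | cons x t ih =>
    rw [List.foldl_cons, ih _ (pvIn_inv hs h x), pvIn_count hs h x]

lemma pvFold_mono {s r : Int} (hs : -1 ≤ s) (l : List Int) (st : List Int × List Int) (k : Nat)
    (h : st.1.getD k (-1) ≠ -1) : (List.foldl (pvIn s r) st l).1.getD k (-1) ≠ -1 := by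
  induction l generalizing st with
  | nil => exact h
  | cons x t ih => exact ih _ (pvIn_mono hs x k h)

lemma pvIn_acc {s r : Int} (c a : List Int) (op : Int) :
    pvIn s r (c, a) op = ((pvIn s r (c, []) op).1, a ++ (pvIn s r (c, []) op).2) := by
  simp only [pvIn]
  split <;> simp

lemma pvFold_acc {s r : Int} (l : List Int) (c a : List Int) :
    List.foldl (pvIn s r) (c, a) l
      = ((List.foldl (pvIn s r) (c, []) l).1, a ++ (List.foldl (pvIn s r) (c, []) l).2) := by
  induction l generalizing c a with
  | nil => simp
  | cons x t ih =>
    rw [List.foldl_cons, List.foldl_cons, pvIn_acc]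
    rw [ih _ (a ++ (pvIn s r (c, []) x).2)]
    rw [ih (pvIn s r (c, []) x).1 (pvIn s r (c, []) x).2]
    simp

lemma pvRunBO_nil (ops : List Int) (g : Nat) (c : List Int) : pvRunBO ops g [] c = c := by
  cases g <;> rfl

lemma pvRound_inv (ops : List Int) (fr : List Int) (st : List Int × List Int)
    (h : pvInv st.1) : pvInv (pvRound ops st fr).1 := by
  induction fr generalizing st with
  | nil => exact h
  | cons r t ih =>
    exact ih _ (pvFold_inv (pvGetD_ge _ h _) ops st h)

lemma pvMain (ops : List Int) : ∀ (f : Nat) (fr nx c : List Int) (g : Nat), pvInv c →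
    fr.length + nx.length + c.count (-1) ≤ f →
    c.count (-1) + (if nx = [] then 0 else 1) ≤ g →
    pvRunA ops f (fr ++ nx) c
      = pvRunBO ops g (pvRound ops (c, nx) fr).2 (pvRound ops (c, nx) fr).1 := by
  intro f
  induction f with
  | zero =>
    intro fr nx c g h hf hg
    have hfr : fr = [] := List.eq_nil_of_length_eq_zero (by omega)
    have hnx : nx = [] := List.eq_nil_of_length_eq_zero (by omega)
    subst hfr; subst hnx
    show pvRunA ops 0 [] c = _
    simp [pvRunA, pvRound, pvRunBO_nil]
  | succ f ih =>
    intro fr nx c g h hf hg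
    cases fr with
    | cons r fr' =>
      have hs : -1 ≤ c.getD r.toNat (-1) := pvGetD_ge c h _
      have hcount := pvFold_count (r := r) hs ops (c, []) h
      have hinv := pvFold_inv (r := r) hs ops (c, []) h
      simp only [List.length_nil, List.length_cons] at hcount hf ⊢
      have hA : pvRunA ops (f + 1) ((r :: fr') ++ nx) c
          = pvRunA ops f (fr' ++ (nx ++ (List.foldl (pvIn (c.getD r.toNat (-1)) r) (c, []) ops).2))
              (List.foldl (pvIn (c.getD r.toNat (-1)) r) (c, []) ops).1 := by
        show pvRunA ops (f + 1) (r :: (fr' ++ nx)) c = _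
        simp only [pvRunA]
        rw [List.append_assoc]
      have hR : pvRound ops (c, nx) (r :: fr')
          = pvRound ops ((List.foldl (pvIn (c.getD r.toNat (-1)) r) (c, []) ops).1,
              nx ++ (List.foldl (pvIn (c.getD r.toNat (-1)) r) (c, []) ops).2) fr' := by
        unfold pvRound
        rw [List.foldl_cons]
        congr 1
        show List.foldl (pvIn (c.getD r.toNat (-1)) r) (c, nx) ops = _
        rw [pvFold_acc]
      rw [hA, hR]
      refine ih fr' (nx ++ _) _ g hinv ?_ ?_
      · simp only [List.length_append]
        omega
      · have hgc : List.count (-1) c ≤ g := by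
          by_cases hnx : nx = []
          · rw [if_pos hnx] at hg; omega
          · rw [if_neg hnx] at hg; omega
        by_cases hnx : nx = []
        · subst hnx
          simp only [List.nil_append]
          by_cases hp : (List.foldl (pvIn (c.getD r.toNat (-1)) r) (c, []) ops).2 = []
          · rw [if_pos hp]
            have h0 : (List.foldl (pvIn (c.getD r.toNat (-1)) r) (c, []) ops).2.length = 0 := by
              rw [hp]; rfl
            omega
          · rw [if_neg hp]
            have h0 : (List.foldl (pvIn (c.getD r.toNat (-1)) r) (c, []) ops).2.length ≠ 0 :=
              fun hlen => hp (List.eq_nil_of_length_eq_zero hlen)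
            omega
        · rw [if_neg (by simp [hnx])]
          rw [if_neg hnx] at hg
          omega
    | nil =>
      cases nx with
      | nil =>
        show pvRunA ops (f + 1) [] c = _
        simp [pvRunA, pvRound, pvRunBO_nil]
      | cons n rest =>
        rw [if_neg (by simp)] at hg
        obtain ⟨g', rfl⟩ : ∃ g', g = g' + 1 := ⟨g - 1, by omega⟩
        have hs : -1 ≤ c.getD n.toNat (-1) := pvGetD_ge c h _
        have hcount := pvFold_count (r := n) hs ops (c, []) h
        have hinv := pvFold_inv (r := n) hs ops (c, []) h
        have hA : pvRunA ops (f + 1) ([] ++ (n :: rest)) c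
            = pvRunA ops f (rest ++ (List.foldl (pvIn (c.getD n.toNat (-1)) n) (c, []) ops).2)
                (List.foldl (pvIn (c.getD n.toNat (-1)) n) (c, []) ops).1 := by
          show pvRunA ops (f + 1) (n :: rest) c = _
          simp only [pvRunA]
        have hB : pvRunBO ops (g' + 1) (pvRound ops (c, n :: rest) []).2 (pvRound ops (c, n :: rest) []).1
            = pvRunBO ops g'
                (pvRound ops ((List.foldl (pvIn (c.getD n.toNat (-1)) n) (c, []) ops).1,
                  (List.foldl (pvIn (c.getD n.toNat (-1)) n) (c, []) ops).2) rest).2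
                (pvRound ops ((List.foldl (pvIn (c.getD n.toNat (-1)) n) (c, []) ops).1,
                  (List.foldl (pvIn (c.getD n.toNat (-1)) n) (c, []) ops).2) rest).1 := by
          show pvRunBO ops (g' + 1) (n :: rest) c = _
          simp only [pvRunBO]
          unfold pvRound
          rw [List.foldl_cons]
        rw [hA, hB]
        refine ih rest _ _ g' hinv ?_ ?_
        · simp only [List.length_nil, List.length_cons] at hf hcount
          omega
        · simp only [List.length_nil] at hcount
          by_cases hp : (List.foldl (pvIn (c.getD n.toNat (-1)) n) (c, []) ops).2 = []
          · rw [if_pos hp]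
            have h0 : (List.foldl (pvIn (c.getD n.toNat (-1)) n) (c, []) ops).2.length = 0 := by
              rw [hp]; rfl
            omega
          · rw [if_neg hp]
            have h0 : (List.foldl (pvIn (c.getD n.toNat (-1)) n) (c, []) ops).2.length ≠ 0 :=
              fun hlen => hp (List.eq_nil_of_length_eq_zero hlen)
            omega

lemma pvInv_init : pvInv ((List.replicate 256 (-1 : Int)).set 0 0) := by
  constructor
  · rw [List.length_set, List.length_replicate]
  · intro x hx
    rcases List.mem_or_eq_of_mem_set hx with hx' | rfl
    · rw [List.eq_of_mem_replicate hx']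
    · omega

lemma pvCount_init : ((List.replicate 256 (-1 : Int)).set 0 0).count (-1) = 255 := by
  have h : (List.replicate 256 (-1 : Int)).set 0 0 = 0 :: List.replicate 255 (-1) := rfl
  rw [h, List.count_cons, List.count_replicate]
  norm_num

-- ===== pvTouch machinery =====

lemma pvTouch_length (v : Int) (c : List Int) (n : Nat) :
    (pvTouch v c n).length = c.length := by
  unfold pvTouch; split <;> simp

lemma pvTF_length (v : Int) (js : List Nat) (c : List Int) :
    (List.foldl (pvTouch v) c js).length = c.length := by
  induction js generalizing c with
  | nil => rfl
  | cons j t ih => rw [List.foldl_cons, ih, pvTouch_length]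

lemma pvTouch_pres (v : Int) (c : List Int) (n : Nat) (i : Nat)
    (h : c.getD i (-1) ≠ -1) : (pvTouch v c n).getD i (-1) = c.getD i (-1) := by
  unfold pvTouch
  split
  case isTrue hn =>
    have hne : n ≠ i := by
      intro e; subst e; exact h (by simpa using hn)
    exact pvGetD_set_ne hne
  case isFalse => rfl

lemma pvTF_pres (v : Int) (js : List Nat) (c : List Int) (i : Nat)
    (h : c.getD i (-1) ≠ -1) :
    (List.foldl (pvTouch v) c js).getD i (-1) = c.getD i (-1) := by
  induction js generalizing c with
  | nil => rfl
  | cons j t ih =>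
    rw [List.foldl_cons, ih _ (by rw [pvTouch_pres v c j i h]; exact h),
      pvTouch_pres v c j i h]

lemma pvTF_char (v : Int) (hv : v ≠ -1) (js : List Nat) (c : List Int) (i : Nat)
    (hi : i < c.length) :
    (List.foldl (pvTouch v) c js).getD i (-1)
      = if c.getD i (-1) = -1 then (if i ∈ js then v else -1) else c.getD i (-1) := by
  induction js generalizing c with
  | nil =>
    by_cases h : c.getD i (-1) = -1 <;> simp
  | cons j t ih =>
    rw [List.foldl_cons, ih _ (by rw [pvTouch_length]; exact hi)]
    by_cases hci : c.getD i (-1) = -1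
    · rw [if_pos hci]
      by_cases hji : j = i
      · subst hji
        have hset : pvTouch v c j = c.set j v := by
          unfold pvTouch; rw [if_pos (by simpa using hci)]
        rw [hset, pvGetD_set_self hi, if_neg hv, if_pos (by simp)]
      · have hstep : (pvTouch v c j).getD i (-1) = c.getD i (-1) := by
          unfold pvTouch
          split
          · exact pvGetD_set_ne hji
          · rfl
        rw [hstep, if_pos hci]
        by_cases hm : i ∈ t
        · rw [if_pos hm, if_pos (List.mem_cons_of_mem j hm)]
        · rw [if_neg hm, if_neg (by
            intro hm'
            rcases List.mem_cons.mp hm' with e | hm''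
            · exact hji e.symm
            · exact hm hm'')]
    · rw [if_neg hci, pvTouch_pres v c j i hci, if_neg hci]

lemma pvTouchP_length (c : List Int) (p : Nat × Int) :
    (pvTouchP c p).length = c.length := by
  unfold pvTouchP; split <;> simp

lemma pvTouchP_pres (c : List Int) (p : Nat × Int) (i : Nat)
    (h : c.getD i (-1) ≠ -1) : (pvTouchP c p).getD i (-1) = c.getD i (-1) := by
  unfold pvTouchP
  split
  case isTrue hn =>
    have hne : p.1 ≠ i := by
      intro e; rw [e] at hn; exact h (by simpa using hn)
    exact pvGetD_set_ne hne
  case isFalse => rfl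

lemma pvTPF_length (ps : List (Nat × Int)) (c : List Int) :
    (List.foldl pvTouchP c ps).length = c.length := by
  induction ps generalizing c with
  | nil => rfl
  | cons p t ih => rw [List.foldl_cons, ih, pvTouchP_length]

lemma pvTPF_char (v : Int) (hv : v ≠ -1) (ps : List (Nat × Int)) (c : List Int) (i : Nat)
    (hi : i < c.length) (h : ∀ p ∈ ps, c.getD p.1 (-1) ≠ -1 ∨ p.2 = v) :
    (List.foldl pvTouchP c ps).getD i (-1)
      = if c.getD i (-1) = -1 then (if (∃ p ∈ ps, p.1 = i) then v else -1)
        else c.getD i (-1) := by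
  induction ps generalizing c with
  | nil =>
    by_cases hci : c.getD i (-1) = -1 <;> simp
  | cons p t ih =>
    rw [List.foldl_cons]
    have htail : ∀ q ∈ t, (pvTouchP c p).getD q.1 (-1) ≠ -1 ∨ q.2 = v := by
      intro q hq
      rcases h q (List.mem_cons_of_mem p hq) with hq' | hq'
      · exact Or.inl (by rw [pvTouchP_pres c p q.1 hq']; exact hq')
      · exact Or.inr hq'
    rw [ih _ (by rw [pvTouchP_length]; exact hi) htail]
    by_cases hcp : c.getD p.1 (-1) = -1
    · have hpv : p.2 = v := by
        rcases h p (List.mem_cons_self ..) with h' | h'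
        · exact absurd hcp h'
        · exact h'
      have hset : pvTouchP c p = c.set p.1 p.2 := by
        unfold pvTouchP; rw [if_pos (by simpa using hcp)]
      by_cases hpi : p.1 = i
      · subst hpi
        rw [hset, pvGetD_set_self hi, hpv, if_neg hv, if_pos hcp,
          if_pos ⟨p, List.mem_cons_self .., rfl⟩]
      · have hne : (c.set p.1 p.2).getD i (-1) = c.getD i (-1) := pvGetD_set_ne hpi
        rw [hset, hne]
        by_cases hci : c.getD i (-1) = -1
        · rw [if_pos hci, if_pos hci]
          have hiff : (∃ q ∈ t, q.1 = i) ↔ (∃ q ∈ p :: t, q.1 = i) := by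
            constructor
            · rintro ⟨q, hq, rfl⟩; exact ⟨q, List.mem_cons_of_mem p hq, rfl⟩
            · rintro ⟨q, hq, rfl⟩
              rcases List.mem_cons.mp hq with rfl | hq'
              · exact absurd rfl hpi
              · exact ⟨q, hq', rfl⟩
          by_cases he : ∃ q ∈ t, q.1 = i
          · rw [if_pos he, if_pos (hiff.mp he)]
          · rw [if_neg he, if_neg (fun h' => he (hiff.mpr h'))]
        · rw [if_neg hci, if_neg hci]
    · have hid : pvTouchP c p = c := by
        unfold pvTouchP; rw [if_neg (by simpa using hcp)]
      rw [hid]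
      by_cases hci : c.getD i (-1) = -1
      · rw [if_pos hci, if_pos hci]
        have hiff : (∃ q ∈ t, q.1 = i) ↔ (∃ q ∈ p :: t, q.1 = i) := by
          constructor
          · rintro ⟨q, hq, rfl⟩; exact ⟨q, List.mem_cons_of_mem p hq, rfl⟩
          · rintro ⟨q, hq, rfl⟩
            rcases List.mem_cons.mp hq with rfl | hq'
            · exact absurd hci hcp
            · exact ⟨q, hq', rfl⟩
        by_cases he : ∃ q ∈ t, q.1 = i
        · rw [if_pos he, if_pos (hiff.mp he)]
        · rw [if_neg he, if_neg (fun h' => he (hiff.mpr h'))]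
      · rw [if_neg hci, if_neg hci]

-- ===== bridges =====

lemma pvInFold_fst (s r : Int) (ops : List Int) (c a : List Int) :
    (List.foldl (pvIn s r) (c, a) ops).1
      = List.foldl (pvTouch (s + 1)) c (ops.map (pvJ r)) := by
  induction ops generalizing c a with
  | nil => rfl
  | cons op t ih =>
    rw [List.foldl_cons, List.map_cons, List.foldl_cons]
    have hJ : pvJ r op = (PySem.Int.mod (r + op) 256).toNat := rfl
    by_cases hg : c.getD ((PySem.Int.mod (r + op) 256).toNat) (-1) = -1
    · have h1 : pvIn s r (c, a) op
          = (c.set ((PySem.Int.mod (r + op) 256).toNat) (s + 1),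
             a ++ [PySem.Int.mod (r + op) 256]) := by
        simp only [pvIn]
        rw [if_pos (beq_iff_eq.mpr hg)]
      have h2 : pvTouch (s + 1) c (pvJ r op)
          = c.set ((PySem.Int.mod (r + op) 256).toNat) (s + 1) := by
        unfold pvTouch
        rw [hJ, if_pos (beq_iff_eq.mpr hg)]
      rw [h1, h2, ih]
    · have h1 : pvIn s r (c, a) op = (c, a) := by
        simp only [pvIn]
        rw [if_neg (by simpa using hg)]
      have h2 : pvTouch (s + 1) c (pvJ r op) = c := by
        unfold pvTouch
        rw [hJ, if_neg (by simpa using hg)]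
      rw [h1, h2, ih]

lemma pvIn_pos {s r op : Int} {c a : List Int}
    (hg : c.getD (PySem.Int.mod (r + op) 256).toNat (-1) = -1) :
    pvIn s r (c, a) op = (c.set (PySem.Int.mod (r + op) 256).toNat (s + 1),
      a ++ [PySem.Int.mod (r + op) 256]) := by
  simp only [pvIn]
  rw [if_pos (beq_iff_eq.mpr hg)]

lemma pvIn_neg {s r op : Int} {c a : List Int}
    (hg : ¬ c.getD (PySem.Int.mod (r + op) 256).toNat (-1) = -1) :
    pvIn s r (c, a) op = (c, a) := by
  simp only [pvIn]
  rw [if_neg (by simpa using hg)]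

lemma pvSweepAux (ops c : List Int) : ∀ (l new : List Int),
    List.foldl (fun new r =>
      let base := c.getD r.toNat (-1)
      if base == -1 then new else List.foldl (pvRelax base r) new ops) new l
      = List.foldl pvTouchP new (l.flatMap fun r =>
          if c.getD r.toNat (-1) = -1 then [] else
            ops.map fun op => (pvJ r op, c.getD r.toNat (-1) + 1)) := by
  intro l
  induction l with
  | nil => intro new; rfl
  | cons r t ih =>
    intro new
    rw [List.foldl_cons, List.flatMap_cons, List.foldl_append, ih]
    congr 1
    by_cases hg : c.getD r.toNat (-1) = -1
    · show (if (c.getD r.toNat (-1) == -1) = true then new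
          else List.foldl (pvRelax (c.getD r.toNat (-1)) r) new ops) = _
      rw [if_pos (beq_iff_eq.mpr hg), if_pos hg]
      rfl
    · show (if (c.getD r.toNat (-1) == -1) = true then new
          else List.foldl (pvRelax (c.getD r.toNat (-1)) r) new ops) = _
      rw [if_neg (by simpa using hg), if_neg hg]
      rw [List.foldl_map]
      rfl

lemma pvSweep_pairs (ops c : List Int) :
    pvSweep ops c = List.foldl pvTouchP c (pvSweepPairs ops c) := by
  unfold pvSweep pvSweepPairs
  exact pvSweepAux ops c (PySem.List.pyRange 0 256 1) c

lemma pvRoundA_arr (ops : List Int) (k : Int) (hk : k ≠ -1) :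
    ∀ (fr c a : List Int), (∀ r ∈ fr, c.getD r.toNat (-1) = k) →
    (pvRound ops (c, a) fr).1
      = List.foldl (pvTouch (k + 1)) c (fr.flatMap fun r => ops.map (pvJ r)) := by
  intro fr
  induction fr with
  | nil => intro c a hF; rfl
  | cons r t ih =>
    intro c a hF
    have hbase : c.getD r.toNat (-1) = k := hF r (List.mem_cons_self ..)
    have hfst : (List.foldl (pvIn (c.getD r.toNat (-1)) r) (c, a) ops).1
        = List.foldl (pvTouch (k + 1)) c (ops.map (pvJ r)) := by
      rw [pvInFold_fst, hbase]
    have h1 : pvRound ops (c, a) (r :: t)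
        = pvRound ops ((List.foldl (pvIn (c.getD r.toNat (-1)) r) (c, a) ops).1,
            (List.foldl (pvIn (c.getD r.toNat (-1)) r) (c, a) ops).2) t := by
      unfold pvRound
      rw [List.foldl_cons, Prod.mk.eta]
    rw [h1, ih _ _ (by
      intro r' hr'
      rw [hfst, pvTF_pres _ _ _ _ (by rw [hF r' (List.mem_cons_of_mem r hr')]; exact hk),
        hF r' (List.mem_cons_of_mem r hr')])]
    rw [List.flatMap_cons, List.foldl_append, hfst]

-- ===== round frontier facts =====

lemma pvRound_acc (ops : List Int) (fr : List Int) : ∀ (c a : List Int),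
    (pvRound ops (c, a) fr).2 = a ++ (pvRound ops (c, []) fr).2 := by
  induction fr with
  | nil => intro c a; simp [pvRound]
  | cons r t ih =>
    intro c a
    have h1 : ∀ b : List Int, pvRound ops (c, b) (r :: t)
        = pvRound ops ((List.foldl (pvIn (c.getD r.toNat (-1)) r) (c, b) ops).1,
            (List.foldl (pvIn (c.getD r.toNat (-1)) r) (c, b) ops).2) t := by
      intro b
      unfold pvRound
      rw [List.foldl_cons, Prod.mk.eta]
    rw [h1 a, ih]
    rw [pvFold_acc (s := c.getD r.toNat (-1)) (r := r) ops c a]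
    conv_rhs => rw [h1 [], ih]
    simp [List.append_assoc]

lemma pvRound_mono (ops : List Int) (fr : List Int) : ∀ (c a : List Int), pvInv c →
    ∀ (i : Nat), c.getD i (-1) ≠ -1 → (pvRound ops (c, a) fr).1.getD i (-1) ≠ -1 := by
  induction fr with
  | nil => intro c a _ i h; exact h
  | cons r t ih =>
    intro c a hc i h
    have hs : -1 ≤ c.getD r.toNat (-1) := pvGetD_ge c hc r.toNat
    have h1 : pvRound ops (c, a) (r :: t)
        = pvRound ops ((List.foldl (pvIn (c.getD r.toNat (-1)) r) (c, a) ops).1,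
            (List.foldl (pvIn (c.getD r.toNat (-1)) r) (c, a) ops).2) t := by
      unfold pvRound
      rw [List.foldl_cons, Prod.mk.eta]
    rw [h1]
    exact ih _ _ (pvFold_inv (r := r) hs ops (c, a) hc) i (pvFold_mono (r := r) hs ops (c, a) i h)

lemma pvInnerMem (s r : Int) (hs : -1 ≤ s) (ops : List Int) :
    ∀ (c a : List Int), pvInv c → ∀ x ∈ (List.foldl (pvIn s r) (c, a) ops).2,
      x ∈ a ∨ (0 ≤ x ∧ x < 256 ∧ c.getD x.toNat (-1) = -1 ∧
        (List.foldl (pvIn s r) (c, a) ops).1.getD x.toNat (-1) ≠ -1) := by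
  induction ops with
  | nil => intro c a _ x hx; exact Or.inl hx
  | cons op t ih =>
    intro c a hc x hx
    rw [List.foldl_cons] at hx ⊢
    by_cases hg : c.getD (PySem.Int.mod (r + op) 256).toNat (-1) = -1
    · have hj : (PySem.Int.mod (r + op) 256).toNat < c.length := by
        rw [hc.1]; exact pvNxt_lt r op
      have hc' : pvInv (c.set (PySem.Int.mod (r + op) 256).toNat (s + 1)) := by
        have := pvIn_inv (r := r) (st := (c, a)) hs hc op
        rwa [pvIn_pos hg] at this
      rw [pvIn_pos hg] at hx ⊢
      rcases ih _ _ hc' x hx with hx' | ⟨h0, h2, h3, h4⟩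
      · rcases List.mem_append.mp hx' with hxa | hxn
        · exact Or.inl hxa
        · have hxe : x = PySem.Int.mod (r + op) 256 := by simpa using hxn
          subst hxe
          refine Or.inr ⟨PySem.Int.mod_nonneg _ (by norm_num),
            PySem.Int.mod_lt _ (by norm_num), hg, ?_⟩
          apply pvFold_mono hs t _ _
          show (c.set (PySem.Int.mod (r + op) 256).toNat (s + 1)).getD
            (PySem.Int.mod (r + op) 256).toNat (-1) ≠ -1
          rw [pvGetD_set_self hj]
          omega
      · refine Or.inr ⟨h0, h2, ?_, h4⟩
        by_cases hxj : x.toNat = (PySem.Int.mod (r + op) 256).toNat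
        · rw [hxj]; exact hg
        · rw [pvGetD_set_ne (fun e => hxj e.symm)] at h3
          exact h3
    · rw [pvIn_neg hg] at hx ⊢
      exact ih _ _ hc x hx

lemma pvRound_mem (ops : List Int) (fr : List Int) : ∀ (c a : List Int), pvInv c →
    ∀ x ∈ (pvRound ops (c, a) fr).2, x ∈ a ∨
      (0 ≤ x ∧ x < 256 ∧ c.getD x.toNat (-1) = -1 ∧
        (pvRound ops (c, a) fr).1.getD x.toNat (-1) ≠ -1) := by
  induction fr with
  | nil => intro c a _ x hx; exact Or.inl hx
  | cons r t ih =>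
    intro c a hc x hx
    have hs : -1 ≤ c.getD r.toNat (-1) := pvGetD_ge c hc r.toNat
    have hinv := pvFold_inv (r := r) hs ops (c, a) hc
    have h1 : pvRound ops (c, a) (r :: t)
        = pvRound ops ((List.foldl (pvIn (c.getD r.toNat (-1)) r) (c, a) ops).1,
            (List.foldl (pvIn (c.getD r.toNat (-1)) r) (c, a) ops).2) t := by
      unfold pvRound
      rw [List.foldl_cons, Prod.mk.eta]
    rw [h1] at hx ⊢
    rcases ih _ _ hinv x hx with hx' | ⟨hx0, hx256, hxm, hxs⟩
    · rcases pvInnerMem _ r hs ops c a hc x hx' with hx'' | ⟨h0, h2, h3, h4⟩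
      · exact Or.inl hx''
      · exact Or.inr ⟨h0, h2, h3, pvRound_mono ops t _ _ hinv x.toNat h4⟩
    · have hcx : c.getD x.toNat (-1) = -1 := by
        by_contra hne
        exact (pvFold_mono (r := r) hs ops (c, a) x.toNat hne) hxm
      exact Or.inr ⟨hx0, hx256, hcx, hxs⟩

lemma pvInnerNewmem (s r : Int) (ops : List Int) :
    ∀ (c a : List Int) (x : Nat), c.getD x (-1) = -1 →
      (List.foldl (pvIn s r) (c, a) ops).1.getD x (-1) ≠ -1 →
      (x : Int) ∈ (List.foldl (pvIn s r) (c, a) ops).2 := by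
  induction ops with
  | nil => intro c a x hx hset; exact absurd hx hset
  | cons op t ih =>
    intro c a x hx hset
    rw [List.foldl_cons] at hset ⊢
    by_cases hg : c.getD (PySem.Int.mod (r + op) 256).toNat (-1) = -1
    · rw [pvIn_pos hg] at hset ⊢
      by_cases hxj : x = (PySem.Int.mod (r + op) 256).toNat
      · have hxi : (x : Int) = PySem.Int.mod (r + op) 256 := by
          have := PySem.Int.mod_nonneg (r + op) (b := 256) (by norm_num)
          omega
        rw [pvFold_acc, hxi]
        simp
      · have hx' : (c.set (PySem.Int.mod (r + op) 256).toNat (s + 1)).getD x (-1) = -1 := by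
          rw [pvGetD_set_ne (fun e => hxj e.symm)]
          exact hx
        exact ih _ _ x hx' hset
    · rw [pvIn_neg hg] at hset ⊢
      exact ih _ _ x hx hset

lemma pvRound_newmem (ops : List Int) (fr : List Int) : ∀ (c a : List Int), pvInv c →
    ∀ (x : Nat), c.getD x (-1) = -1 →
      (pvRound ops (c, a) fr).1.getD x (-1) ≠ -1 →
      (x : Int) ∈ (pvRound ops (c, a) fr).2 := by
  induction fr with
  | nil => intro c a _ x hx hset; exact absurd hx hset
  | cons r t ih =>
    intro c a hc x hx hset
    have hs : -1 ≤ c.getD r.toNat (-1) := pvGetD_ge c hc r.toNat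
    have hinv := pvFold_inv (r := r) hs ops (c, a) hc
    have h1 : pvRound ops (c, a) (r :: t)
        = pvRound ops ((List.foldl (pvIn (c.getD r.toNat (-1)) r) (c, a) ops).1,
            (List.foldl (pvIn (c.getD r.toNat (-1)) r) (c, a) ops).2) t := by
      unfold pvRound
      rw [List.foldl_cons, Prod.mk.eta]
    rw [h1] at hset ⊢
    by_cases hmid : (List.foldl (pvIn (c.getD r.toNat (-1)) r) (c, a) ops).1.getD x (-1) = -1
    · exact ih _ _ hinv x hmid hset
    · have hmem : (x : Int) ∈ (List.foldl (pvIn (c.getD r.toNat (-1)) r) (c, a) ops).2 :=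
        pvInnerNewmem _ r ops c a x hx hmid
      rw [pvRound_acc]
      exact List.mem_append_left _ hmem

lemma pvRound_count (ops : List Int) (fr : List Int) : ∀ (c a : List Int), pvInv c →
    (pvRound ops (c, a) fr).1.count (-1) + (pvRound ops (c, a) fr).2.length
      = c.count (-1) + a.length := by
  induction fr with
  | nil => intro c a _; rfl
  | cons r t ih =>
    intro c a hc
    have hs : -1 ≤ c.getD r.toNat (-1) := pvGetD_ge c hc r.toNat
    have h1 : pvRound ops (c, a) (r :: t)
        = pvRound ops ((List.foldl (pvIn (c.getD r.toNat (-1)) r) (c, a) ops).1,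
            (List.foldl (pvIn (c.getD r.toNat (-1)) r) (c, a) ops).2) t := by
      unfold pvRound
      rw [List.foldl_cons, Prod.mk.eta]
    rw [h1]
    have h2 := ih (List.foldl (pvIn (c.getD r.toNat (-1)) r) (c, a) ops).1
      (List.foldl (pvIn (c.getD r.toNat (-1)) r) (c, a) ops).2
      (pvFold_inv (r := r) hs ops (c, a) hc)
    have h3 : List.count (-1) (List.foldl (pvIn (c.getD r.toNat (-1)) r) (c, a) ops).1
        + (List.foldl (pvIn (c.getD r.toNat (-1)) r) (c, a) ops).2.length
        = List.count (-1) c + a.length := pvFold_count (r := r) hs ops (c, a) hc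
    omega

-- ===== sweep = round, invariant step, closed identity =====

lemma pvPairs_mem {ops c : List Int} {p : Nat × Int} (hp : p ∈ pvSweepPairs ops c) :
    ∃ r op, 0 ≤ r ∧ r < 256 ∧ op ∈ ops ∧ c.getD r.toNat (-1) ≠ -1 ∧
      p = (pvJ r op, c.getD r.toNat (-1) + 1) := by
  unfold pvSweepPairs at hp
  rcases List.mem_flatMap.mp hp with ⟨r, hr, hpr⟩
  have hr' := (PySem.List.mem_pyRange_one).mp hr
  by_cases hg : c.getD r.toNat (-1) = -1
  · rw [if_pos hg] at hpr
    simp at hpr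
  · rw [if_neg hg] at hpr
    rcases List.mem_map.mp hpr with ⟨op, hop, rfl⟩
    exact ⟨r, op, hr'.1, hr'.2, hop, hg, rfl⟩

lemma pvPairs_mem_of {ops c : List Int} {r op : Int} (h0 : 0 ≤ r) (h1 : r < 256)
    (hop : op ∈ ops) (hg : c.getD r.toNat (-1) ≠ -1) :
    (pvJ r op, c.getD r.toNat (-1) + 1) ∈ pvSweepPairs ops c := by
  unfold pvSweepPairs
  refine List.mem_flatMap.mpr ⟨r, (PySem.List.mem_pyRange_one).mpr ⟨h0, h1⟩, ?_⟩
  rw [if_neg hg]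
  exact List.mem_map.mpr ⟨op, hop, rfl⟩

-- a reached source of an unreached target must lie on the frontier (closure, contrapositive)
lemma pvSrc_fr {ops : List Int} {c fr : List Int}
    (hC : ∀ i : Nat, i < 256 → c.getD i (-1) ≠ -1 → (i : Int) ∉ fr →
      ∀ op ∈ ops, c.getD (pvJ (i : Int) op) (-1) ≠ -1)
    {r op : Int} (h0 : 0 ≤ r) (h1 : r < 256) (hop : op ∈ ops)
    (hg : c.getD r.toNat (-1) ≠ -1) (ht : c.getD (pvJ r op) (-1) = -1) : r ∈ fr := by
  have hrn : ((r.toNat : Nat) : Int) = r := Int.toNat_of_nonneg h0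
  by_contra hrf
  have := hC r.toNat (by omega) hg (by rw [hrn]; exact hrf) op hop
  rw [hrn] at this
  exact this ht

lemma pvSweep_eq_round (ops : List Int) (k : Int) (c fr : List Int)
    (hI : pvInvFull ops k c fr) : pvSweep ops c = (pvRound ops (c, []) fr).1 := by
  obtain ⟨hinv, hk, hF, hC⟩ := hI
  have hk' : k ≠ -1 := by omega
  have hround := pvRoundA_arr ops k hk' fr c [] (fun r hr => (hF r hr).2.2)
  rw [pvSweep_pairs, hround]
  have hH : ∀ p ∈ pvSweepPairs ops c, c.getD p.1 (-1) ≠ -1 ∨ p.2 = k + 1 := by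
    intro p hp
    rcases pvPairs_mem hp with ⟨r, op, h0, h1, hop, hg, rfl⟩
    by_cases hcp : c.getD (pvJ r op) (-1) = -1
    · right
      have hrf : r ∈ fr := pvSrc_fr hC h0 h1 hop hg hcp
      rw [(hF r hrf).2.2]
    · left
      exact hcp
  apply List.ext_getElem
  · rw [pvTPF_length, pvTF_length]
  · intro i h1 h2
    have hi : i < c.length := by rw [pvTPF_length] at h1; exact h1
    rw [← List.getD_eq_getElem _ (-1) h1, ← List.getD_eq_getElem _ (-1) h2]
    rw [pvTPF_char (k + 1) (by omega) _ _ _ hi hH, pvTF_char (k + 1) (by omega) _ _ _ hi]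
    by_cases hci : c.getD i (-1) = -1
    · rw [if_pos hci, if_pos hci]
      have hiff : (∃ p ∈ pvSweepPairs ops c, p.1 = i)
          ↔ i ∈ fr.flatMap fun r => ops.map (pvJ r) := by
        constructor
        · rintro ⟨p, hp, hpi⟩
          rcases pvPairs_mem hp with ⟨r, op, h0', h1', hop, hg, rfl⟩
          simp only [] at hpi
          subst hpi
          have hrf : r ∈ fr := pvSrc_fr hC h0' h1' hop hg hci
          exact List.mem_flatMap.mpr ⟨r, hrf, List.mem_map.mpr ⟨op, hop, rfl⟩⟩
        · intro hmem
          rcases List.mem_flatMap.mp hmem with ⟨r, hrf, hri⟩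
          rcases List.mem_map.mp hri with ⟨op, hop, rfl⟩
          obtain ⟨h0', h1', hfk⟩ := hF r hrf
          exact ⟨_, pvPairs_mem_of h0' h1' hop (by rw [hfk]; exact hk'), rfl⟩
      by_cases hm : i ∈ fr.flatMap fun r => ops.map (pvJ r)
      · rw [if_pos (hiff.mpr hm), if_pos hm]
      · rw [if_neg (fun h => hm (hiff.mp h)), if_neg hm]
    · rw [if_neg hci, if_neg hci]

lemma pvInvFull_step (ops : List Int) (k : Int) (c fr : List Int)
    (hI : pvInvFull ops k c fr) :
    pvInvFull ops (k + 1) (pvRound ops (c, []) fr).1 (pvRound ops (c, []) fr).2 := by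
  obtain ⟨hinv, hk, hF, hC⟩ := hI
  have hk' : k ≠ -1 := by omega
  have hround := pvRoundA_arr ops k hk' fr c [] (fun r hr => (hF r hr).2.2)
  have hinv' : pvInv (pvRound ops (c, []) fr).1 := pvRound_inv ops fr (c, []) hinv
  refine ⟨hinv', by omega, ?_, ?_⟩
  · intro x hx
    rcases pvRound_mem ops fr c [] hinv x hx with hx' | ⟨h0, h1, h2, h3⟩
    · simp at hx'
    · refine ⟨h0, h1, ?_⟩
      have hchar := pvTF_char (k + 1) (by omega) (fr.flatMap fun r => ops.map (pvJ r)) c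
        x.toNat (by rw [hinv.1]; omega)
      by_cases hmem : x.toNat ∈ fr.flatMap fun r => ops.map (pvJ r)
      · rw [hround, hchar, if_pos h2, if_pos hmem]
      · exfalso
        apply h3
        rw [hround, hchar, if_pos h2, if_neg hmem]
  · intro i hi hne hnotfr op hop
    by_cases hci : c.getD i (-1) = -1
    · exact absurd (pvRound_newmem ops fr c [] hinv i hci hne) hnotfr
    · by_cases hif : (i : Int) ∈ fr
      · have hmem : pvJ (i : Int) op ∈ fr.flatMap fun r => ops.map (pvJ r) :=
          List.mem_flatMap.mpr ⟨_, hif, List.mem_map.mpr ⟨op, hop, rfl⟩⟩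
        rw [hround, pvTF_char (k + 1) (by omega) _ _ _ (by rw [hinv.1]; exact pvJ_lt _ _)]
        by_cases hcj : c.getD (pvJ (i : Int) op) (-1) = -1
        · rw [if_pos hcj, if_pos hmem]
          omega
        · rw [if_neg hcj]
          exact hcj
      · exact pvRound_mono ops fr c [] hinv _ (hC i hi hci hif op hop)

lemma pvSweep_closed (ops : List Int) (c : List Int)
    (hc : pvClosed ops c) : pvSweep ops c = c := by
  rw [pvSweep_pairs]
  have hH : ∀ p ∈ pvSweepPairs ops c, c.getD p.1 (-1) ≠ -1 := by
    intro p hp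
    rcases pvPairs_mem hp with ⟨r, op, h0, h1, hop, hg, rfl⟩
    have hrn : ((r.toNat : Nat) : Int) = r := Int.toNat_of_nonneg h0
    have := hc r.toNat (by omega) hg op hop
    rwa [hrn] at this
  apply List.ext_getElem
  · rw [pvTPF_length]
  · intro i h1 h2
    have hi : i < c.length := h2
    rw [← List.getD_eq_getElem _ (-1) h1, ← List.getD_eq_getElem _ (-1) h2,
      pvTPF_char 0 (by omega) _ _ _ hi (fun p hp => Or.inl (hH p hp))]
    by_cases hci : c.getD i (-1) = -1
    · rw [if_pos hci]
      have hno : ¬ ∃ p ∈ pvSweepPairs ops c, p.1 = i := by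
        rintro ⟨p, hp, hpi⟩
        rw [← hpi] at hci
        exact hH p hp hci
      rw [if_neg hno, hci]
    · rw [if_neg hci]

lemma pvRunJ_closed (ops : List Int) (m : Nat) (c : List Int)
    (hc : pvClosed ops c) : pvRunJ ops m c = c := by
  induction m with
  | zero => rfl
  | succ m ih =>
    show pvRunJ ops m (pvSweep ops c) = c
    rw [pvSweep_closed ops c hc]
    exact ih

lemma pvClosed_of_inv {ops : List Int} {k : Int} {c : List Int}
    (hI : pvInvFull ops k c []) : pvClosed ops c := by
  intro i hi hr op hop
  exact hI.2.2.2 i hi hr (by simp) op hop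

lemma pvClosed_of_count {ops : List Int} {c : List Int} (hl : c.length = 256)
    (h0 : c.count (-1) = 0) : pvClosed ops c := by
  have hall : ∀ j : Nat, j < 256 → c.getD j (-1) ≠ -1 := by
    intro j hj
    rw [List.getD_eq_getElem _ _ (by omega)]
    intro he
    exact (List.count_eq_zero.mp h0) (he ▸ List.getElem_mem (by omega))
  intro i hi _ op _
  exact hall _ (pvJ_lt _ _)

lemma pvSync (ops : List Int) : ∀ (g m : Nat) (k : Int) (c fr : List Int),
    pvInvFull ops k c fr → c.count (-1) + 1 ≤ g → c.count (-1) ≤ m →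
    pvRunBO ops g fr c = pvRunJ ops m c := by
  intro g
  induction g with
  | zero =>
    intro m k c fr _ hg _
    omega
  | succ g ih =>
    intro m k c fr hI hg hm
    cases fr with
    | nil =>
      rw [pvRunBO_nil]
      exact (pvRunJ_closed ops m c (pvClosed_of_inv hI)).symm
    | cons r rest =>
      obtain ⟨hinv, hk, hF, hC⟩ := hI
      have h13 := pvSweep_eq_round ops k c (r :: rest) ⟨hinv, hk, hF, hC⟩
      have hcnt := pvRound_count ops (r :: rest) c [] hinv
      simp only [List.length_nil] at hcnt
      have hI' := pvInvFull_step ops k c (r :: rest) ⟨hinv, hk, hF, hC⟩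
      have hBO : pvRunBO ops (g + 1) (r :: rest) c
          = pvRunBO ops g (pvRound ops (c, []) (r :: rest)).2
              (pvRound ops (c, []) (r :: rest)).1 := by
        simp only [pvRunBO]
      rw [hBO]
      by_cases hfr' : (pvRound ops (c, []) (r :: rest)).2 = []
      · have hcl : pvClosed ops (pvRound ops (c, []) (r :: rest)).1 :=
          pvClosed_of_inv (hfr' ▸ hI')
        rw [hfr', pvRunBO_nil]
        cases m with
        | zero =>
          have hc0 : c.count (-1) = 0 := by omega
          show (pvRound ops (c, []) (r :: rest)).1 = c
          rw [← h13]
          exact pvSweep_closed ops c (pvClosed_of_count hinv.1 hc0)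
        | succ m' =>
          show _ = pvRunJ ops m' (pvSweep ops c)
          rw [h13]
          exact (pvRunJ_closed ops m' _ hcl).symm
      · have hlen' : 1 ≤ (pvRound ops (c, []) (r :: rest)).2.length := by
          rcases he : (pvRound ops (c, []) (r :: rest)).2 with _ | ⟨y, ys⟩
          · exact absurd he hfr'
          · simp
        obtain ⟨m', rfl⟩ : ∃ m', m = m' + 1 := ⟨m - 1, by omega⟩
        have hJ : pvRunJ ops (m' + 1) c = pvRunJ ops m' (pvRound ops (c, []) (r :: rest)).1 := by
          show pvRunJ ops m' (pvSweep ops c) = _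
          rw [h13]
        rw [hJ]
        exact ih m' (k + 1) _ _ hI' (by omega) (by omega)

lemma pvInit_getD (i : Nat) (h : i ≠ 0) :
    ((List.replicate 256 (-1 : Int)).set 0 0).getD i (-1) = -1 := by
  have he : (List.replicate 256 (-1 : Int)).set 0 0 = 0 :: List.replicate 255 (-1) := rfl
  rw [he]
  cases i with
  | zero => exact absurd rfl h
  | succ j =>
    rw [List.getD_cons_succ]
    by_cases hj : j < 255
    · rw [List.getD_eq_getElem _ _ (by rw [List.length_replicate]; exact hj)]
      exact List.getElem_replicate _
    · rw [List.getD_eq_default _ _ (by rw [List.length_replicate]; omega)]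

lemma pvInvFull_init (ops : List Int) :
    pvInvFull ops 0 ((List.replicate 256 (-1 : Int)).set 0 0) [0] := by
  refine ⟨pvInv_init, le_refl 0, ?_, ?_⟩
  · intro r hr
    have hr0 : r = 0 := by simpa using hr
    subst hr0
    exact ⟨le_refl 0, by norm_num, rfl⟩
  · intro i hi hne hnot op hop
    by_cases hi0 : i = 0
    · subst hi0
      exact absurd (by simp) hnot
    · exact absurd (pvInit_getD i hi0) hne

lemma pvCosts (ops : List Int) :
    pvRunA ops 257 [0] ((List.replicate 256 (-1 : Int)).set 0 0)
      = pvRunJ ops 256 ((List.replicate 256 (-1 : Int)).set 0 0) := by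
  have h := pvMain ops 257 [] [0] ((List.replicate 256 (-1 : Int)).set 0 0) 257 pvInv_init
    (by rw [pvCount_init]; norm_num)
    (by rw [pvCount_init, if_neg (by simp)]; norm_num)
  rw [List.nil_append] at h
  have he1 : (pvRound ops ((List.replicate 256 (-1 : Int)).set 0 0, [0]) []).2 = [0] := rfl
  have he2 : (pvRound ops ((List.replicate 256 (-1 : Int)).set 0 0, [0]) []).1
      = (List.replicate 256 (-1 : Int)).set 0 0 := rfl
  rw [he1, he2] at h
  rw [h]
  exact pvSync ops 257 256 0 _ [0] (pvInvFull_init ops)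
    (by rw [pvCount_init]; norm_num) (by rw [pvCount_init]; norm_num)

-- ===== VERDICT (by name: the statement is the Claim_ definition above) =====
theorem get_total_steps_spec : Claim_equal_get_total_steps := by
  intro operations target_byte _ _
  unfold Spec_get_total_steps get_total_steps get_total_steps_alt
  rw [pvCosts operations]
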